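-- pv_equiv track=rewrite | github.com/minnseong/Algorithm | programmers/Kakao/getReportResults.py | disposeReport
-- ===== SOURCE A (Python) =====
-- def disposeReport(reportList, k):
--
--     dic = dict()
--     stopSet = set()
--
--     for r in reportList:
--         rter, rted = r.split()
--
--         if rted in dic:
--             dic[rted].append(rter)
--         else:
--             dic[rted] = [rter]
--
--     for d in dic.keys():
--         if len(dic[d]) >= k:
--             stopSet.add(d)
--
--     return dic, stopSet
-- ===== SOURCE B (Python) =====
-- def disposeReport(reportList, k):
--     # Tokenize once; for each distinct reportee (in first-occurrence order)
--     # gather all its reporters in one scan, and decide its stop-set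
--     # membership right there -- no second pass over the keys.
--     pairs = [r.split() for r in reportList]
--     dic = dict()
--     stopSet = set()
--     for p in pairs:
--         rted = p[1]
--         if rted not in dic:
--             reporters = [q[0] for q in pairs if q[1] == rted]
--             dic[rted] = reporters
--             if len(reporters) >= k:
--                 stopSet.add(rted)
--     return dic, stopSet
-- ===== Notes on version B (the rewrite author's own statement) =====
-- stated objective: alternative
-- what changed: A appends each reporter to a growing per-reportee dict and then rescans all keys for len>=k; B tokenizes once and, per distinct reportee at its first occurrence, gathers all its reporters in one scan and decides stop-set membership on the spot, so there is no second pass over the keys.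
import Mathlib
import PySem

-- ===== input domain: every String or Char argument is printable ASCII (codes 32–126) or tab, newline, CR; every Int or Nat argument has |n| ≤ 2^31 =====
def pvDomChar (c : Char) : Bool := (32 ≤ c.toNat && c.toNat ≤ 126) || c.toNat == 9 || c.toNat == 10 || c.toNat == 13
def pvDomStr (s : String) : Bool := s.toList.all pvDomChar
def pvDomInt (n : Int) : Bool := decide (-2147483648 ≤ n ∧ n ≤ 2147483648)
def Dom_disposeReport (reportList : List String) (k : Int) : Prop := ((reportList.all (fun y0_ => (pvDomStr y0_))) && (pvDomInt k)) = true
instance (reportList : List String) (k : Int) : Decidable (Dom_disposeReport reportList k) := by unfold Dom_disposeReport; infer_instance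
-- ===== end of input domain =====

-- B replaces A's build-then-rescan (append to dic per report, then a second loop over the keys
-- testing len >= k) by a per-distinct-reportee gather: tokenize once, and for each reportee the
-- first time it is seen collect all its reporters in one scan and decide stop-set membership
-- right there — a different decomposition (objective: alternative), same return value.

-- ===== PORT A =====
def disposeReport (reportList : List String) (k : Int) : (List (String × List String)) × List String :=
  let dic : PySem.Dict String (List String) :=
    reportList.foldl (fun dic r =>
      match PySem.Str.split₀ r with
      | [rter, rted] =>
          if dic.contains rted then dic.modify rted [] (fun v => v ++ [rter])
          else dic.insert rted [rter]
      | _ => dic)   -- Python raises ValueError (unpack) here; excluded by Pre_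
      PySem.Dict.empty
  let stopSet : List String :=
    dic.keys.foldl (fun s d =>
      if k ≤ ((dic.getD d []).length : Int) then PySem.Set.add s d else s) []
  (dic.items, stopSet)

-- ===== PORT B =====
def disposeReport_alt (reportList : List String) (k : Int) : (List (String × List String)) × List String :=
  let pairs := reportList.map (fun r => PySem.Str.split₀ r)
  let st :=
    pairs.foldl (fun (st : PySem.Dict String (List String) × List String) p =>
      match PySem.List.pyGet? p 1 with
      | none => st   -- Python raises IndexError here; excluded by Pre_
      | some rted =>
        if st.1.contains rted then st
        else
          let reporters := pairs.filterMap (fun q =>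
            match PySem.List.pyGet? q 1, PySem.List.pyGet? q 0 with
            | some t, some a => if t == rted then some a else none
            | _, _ => none)   -- the nones are Python IndexError; excluded by Pre_
          (st.1.insert rted reporters,
           if k ≤ ((reporters.length : Int)) then PySem.Set.add st.2 rted else st.2))
      (PySem.Dict.empty, [])
  (st.1.items, st.2)

-- ===== PRECONDITION & SPEC =====
-- Pre_ excludes exactly the reports that do not split into two whitespace-separated tokens,
-- on which Python A raises ValueError at 'rter, rted = r.split()'.
def Pre_disposeReport (reportList : List String) (k : Int) : Prop :=
  ∀ r ∈ reportList, (PySem.Str.split₀ r).length = 2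
instance (reportList : List String) (k : Int) : Decidable (Pre_disposeReport reportList k) := by unfold Pre_disposeReport; infer_instance

def pvWitness_disposeReport : List String × Int := (["a b", "c b", "a b"], 2)

def Spec_disposeReport (reportList : List String) (k : Int) (out : (List (String × List String)) × List String) : Prop := out = disposeReport_alt reportList k
instance (reportList : List String) (k : Int) (out : (List (String × List String)) × List String) : Decidable (Spec_disposeReport reportList k out) := by unfold Spec_disposeReport; infer_instance

-- ===== CLAIM (what is proved, stated in full; the proofs are below) =====
def Claim_equal_disposeReport : Prop := ∀ (reportList : List String) (k : Int), Dom_disposeReport reportList k → Pre_disposeReport reportList k → Spec_disposeReport reportList k (disposeReport reportList k)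

-- ===== LEMMAS AND PROOFS =====

-- (rted, rter) pairs of a report list (meaningful under Pre_, where each split has length 2)
def pvPairs (reportList : List String) : List (String × String) :=
  reportList.map (fun r => (((PySem.Str.split₀ r).getD 1 ""), ((PySem.Str.split₀ r).getD 0 "")))

-- all reporters of reportee c, in order
def pvG (pl : List (String × String)) (c : String) : List String :=
  (pl.filter (fun q => q.1 == c)).map (fun q => q.2)

-- distinct reportees in first-occurrence order
def pvK (pl : List (String × String)) : List String :=
  PySem.Set.ofList (pl.map Prod.fst)

lemma pv_split_eq (reportList : List String) (h : ∀ r ∈ reportList, (PySem.Str.split₀ r).length = 2) :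
    reportList.map (fun r => PySem.Str.split₀ r)
      = (pvPairs reportList).map (fun q => [q.2, q.1]) := by
  unfold pvPairs
  rw [List.map_map]
  apply List.map_congr_left
  intro r hr
  have h2 := h r hr
  rcases hl : PySem.Str.split₀ r with _ | ⟨a, _ | ⟨b, t⟩⟩ <;> rw [hl] at h2 <;> simp_all

lemma pv_filterMap_eq (pl : List (String × String)) (c : String) :
    pl.filterMap (fun q => if q.1 == c then some q.2 else none) = pvG pl c := by
  unfold pvG
  induction pl with
  | nil => rfl
  | cons q t ih =>
    by_cases h : q.1 = c
    · simpa [List.filterMap_cons, List.filter_cons, h] using ih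
    · simpa [List.filterMap_cons, List.filter_cons, h] using ih

lemma pv_modify_absent (d : PySem.Dict String (List String)) (c v : String)
    (h : d.contains c = false) : d.modify c [] (fun l => l ++ [v]) = d.insert c [v] := by
  rw [PySem.Dict.modify, PySem.Dict.getD_of_not_contains _ _ h]
  rfl

lemma pv_set_add_not_mem {s : PySem.Set String} {x : String} (h : x ∉ s) :
    PySem.Set.add s x = s ++ [x] := by
  simp [PySem.Set.add, h]

lemma pv_set_ofList_append (l : List String) (x : String) :
    PySem.Set.ofList (l ++ [x]) = PySem.Set.add (PySem.Set.ofList l) x := by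
  simp [PySem.Set.ofList]

-- a nodup loop that conditionally adds to a set is a filter
lemma pv_foldl_set_filter (p : String → Prop) [DecidablePred p] :
    ∀ (l : List String) (s0 : List String), (∀ x ∈ l, x ∉ s0) → l.Nodup →
    l.foldl (fun s x => if p x then PySem.Set.add s x else s) s0
      = s0 ++ l.filter (fun x => decide (p x)) := by
  intro l
  induction l with
  | nil => simp
  | cons x t ih =>
    intro s0 hdis hnd
    by_cases hp : p x
    · rw [List.foldl_cons, if_pos hp, pv_set_add_not_mem (hdis x (by simp))]
      rw [ih (s0 ++ [x]) (by
            intro y hy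
            simp only [List.mem_append, List.mem_singleton]
            rintro (h | rfl)
            · exact hdis y (by simp [hy]) h
            · exact (List.nodup_cons.mp hnd).1 hy)
          (List.nodup_cons.mp hnd).2]
      simp [hp]
    · rw [List.foldl_cons, if_neg hp]
      rw [ih s0 (fun y hy => hdis y (by simp [hy])) (List.nodup_cons.mp hnd).2]
      simp [hp]

-- ---- characterization of A ----

lemma pv_A_dict (pl : List (String × String)) :
    pl.foldl (fun d q =>
        if d.contains q.1 then d.modify q.1 [] (fun v => v ++ [q.2])
        else d.insert q.1 [q.2]) PySem.Dict.empty
      = pl.foldl (fun d q => d.modify q.1 [] (fun v => v ++ [q.2])) PySem.Dict.empty := by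
  apply PySem.List.foldl_congr_mem
  intro d q _
  by_cases h : d.contains q.1
  · rw [if_pos h]
  · rw [if_neg h, pv_modify_absent d q.1 q.2 (by simpa using h)]

lemma pv_A_keys (pl : List (String × String)) :
    (pl.foldl (fun d q => d.modify q.1 [] (fun v => v ++ [q.2])) PySem.Dict.empty).keys = pvK pl := by
  have := PySem.Dict.keys_foldl_modify_key pl Prod.fst []
    (fun _ q v => v ++ [q.2]) (PySem.Dict.empty (κ := String) (ν := List String))
  simpa [pvK, PySem.Set.update, PySem.Set.ofList] using this

lemma pv_A_getD (pl : List (String × String)) (c : String) :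
    (pl.foldl (fun d q => d.modify q.1 [] (fun v => v ++ [q.2])) PySem.Dict.empty).getD c [] = pvG pl c := by
  have := PySem.Dict.getD_foldl_modify_append pl (PySem.Dict.empty (κ := String) (ν := List String)) c
  simpa [pvG] using this

lemma pv_A_nodup (pl : List (String × String)) :
    (pl.foldl (fun d q => d.modify q.1 [] (fun v => v ++ [q.2])) PySem.Dict.empty).keys.Nodup := by
  exact PySem.Dict.nodup_keys_foldl_modify_key pl Prod.fst [] _ _ (by simp)

-- ---- characterization of B ----

lemma pv_keys_mk_map (K : List String) (f : String → List String) :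
    (PySem.Dict.mk (K.map (fun c => (c, f c)))).keys = K := by
  simp [PySem.Dict.keys, List.map_map, Function.comp_def]

lemma pv_B_loop (pl : List (String × String)) (k : Int) :
    ∀ (rest pre : List (String × String)), pl = pre ++ rest →
    rest.foldl (fun (st : PySem.Dict String (List String) × List String) q =>
        if st.1.contains q.1 then st
        else (st.1.insert q.1 (pvG pl q.1),
              if k ≤ ((pvG pl q.1).length : Int) then PySem.Set.add st.2 q.1 else st.2))
      (PySem.Dict.mk ((pvK pre).map (fun c => (c, pvG pl c))),
       (pvK pre).filter (fun c => decide (k ≤ ((pvG pl c).length : Int))))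
      = (PySem.Dict.mk ((pvK (pre ++ rest)).map (fun c => (c, pvG pl c))),
         (pvK (pre ++ rest)).filter (fun c => decide (k ≤ ((pvG pl c).length : Int)))) := by
  intro rest
  induction rest with
  | nil => intro pre _; simp
  | cons q t ih =>
    intro pre hpl
    rw [List.foldl_cons]
    have hkpre : pvK (pre ++ [q]) = PySem.Set.add (pvK pre) q.1 := by
      simp only [pvK, List.map_append, List.map_cons, List.map_nil]
      exact pv_set_ofList_append _ _
    have hcont : (PySem.Dict.mk ((pvK pre).map (fun c => (c, pvG pl c)))).contains q.1
        = decide (q.1 ∈ pvK pre) := by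
      rw [PySem.Dict.contains_eq_decide_mem_keys, pv_keys_mk_map]
    by_cases hm : q.1 ∈ pvK pre
    · -- already a key: state unchanged
      rw [if_pos (by rw [hcont]; simpa using hm)]
      have hK : pvK (pre ++ [q]) = pvK pre := by
        rw [hkpre]; simp [PySem.Set.add, hm]
      have := ih (pre ++ [q]) (by simp [hpl])
      rw [hK] at this
      rw [this]
      simp [hpl]
    · -- fresh key: append to dict, maybe to stop set
      rw [if_neg (by rw [hcont]; simpa using hm)]
      have hK : pvK (pre ++ [q]) = pvK pre ++ [q.1] := by
        rw [hkpre, pv_set_add_not_mem hm]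
      have hfresh : (PySem.Dict.mk ((pvK pre).map (fun c => (c, pvG pl c)))).insert q.1 (pvG pl q.1)
          = PySem.Dict.mk ((pvK (pre ++ [q])).map (fun c => (c, pvG pl c))) := by
        apply PySem.Dict.ext
        rw [PySem.Dict.items_insert_of_not_contains _ _ (by rw [hcont]; simpa using hm)]
        simp [hK]
      have hstop : (if k ≤ ((pvG pl q.1).length : Int)
              then PySem.Set.add ((pvK pre).filter (fun c => decide (k ≤ ((pvG pl c).length : Int)))) q.1
              else (pvK pre).filter (fun c => decide (k ≤ ((pvG pl c).length : Int))))
          = (pvK (pre ++ [q])).filter (fun c => decide (k ≤ ((pvG pl c).length : Int))) := by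
        rw [hK, List.filter_append]
        by_cases hc : k ≤ ((pvG pl q.1).length : Int)
        · rw [if_pos hc, pv_set_add_not_mem (fun hmem => hm (List.mem_of_mem_filter hmem))]
          simp [hc]
        · rw [if_neg hc]; simp [hc]
      rw [hfresh, hstop]
      have := ih (pre ++ [q]) (by simpa using hpl)
      rw [this]
      simp [hpl]

-- ---- evaluation lemmas ----

lemma pv_A_eval (reportList : List String) (k : Int)
    (hpre : ∀ r ∈ reportList, (PySem.Str.split₀ r).length = 2) :
    disposeReport reportList k
      = ((pvK (pvPairs reportList)).map (fun c => (c, pvG (pvPairs reportList) c)),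
         (pvK (pvPairs reportList)).filter
           (fun c => decide (k ≤ ((pvG (pvPairs reportList) c).length : Int)))) := by
  simp only [disposeReport]
  have hdic : reportList.foldl (fun dic r =>
      match PySem.Str.split₀ r with
      | [rter, rted] =>
          if dic.contains rted then dic.modify rted [] (fun v => v ++ [rter])
          else dic.insert rted [rter]
      | _ => dic) PySem.Dict.empty
      = (pvPairs reportList).foldl (fun d q => d.modify q.1 [] (fun v => v ++ [q.2]))
          PySem.Dict.empty := by
    rw [← pv_A_dict]
    unfold pvPairs
    rw [List.foldl_map]
    apply PySem.List.foldl_congr_mem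
    intro acc r hr
    have h2 := hpre r hr
    rcases hl : PySem.Str.split₀ r with _ | ⟨a, _ | ⟨b, t⟩⟩ <;> rw [hl] at h2 <;>
      simp at h2
    subst h2
    rfl
  rw [hdic]
  have hnd := pv_A_nodup (pvPairs reportList)
  rw [PySem.Dict.items_eq_map_keys _ hnd ([] : List String)]
  simp only [pv_A_keys, pv_A_getD]
  rw [pv_foldl_set_filter (fun c => k ≤ ((pvG (pvPairs reportList) c).length : Int))
      (pvK (pvPairs reportList)) [] (by simp)
      (by simpa [pvK] using PySem.Set.nodup_ofList ((pvPairs reportList).map Prod.fst))]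
  simp

lemma pv_B_eval (reportList : List String) (k : Int)
    (hpre : ∀ r ∈ reportList, (PySem.Str.split₀ r).length = 2) :
    disposeReport_alt reportList k
      = ((pvK (pvPairs reportList)).map (fun c => (c, pvG (pvPairs reportList) c)),
         (pvK (pvPairs reportList)).filter
           (fun c => decide (k ≤ ((pvG (pvPairs reportList) c).length : Int)))) := by
  simp only [disposeReport_alt]
  rw [pv_split_eq reportList hpre]
  rw [List.foldl_map]
  simp only [List.filterMap_map]
  have hredB : (fun (st : PySem.Dict String (List String) × List String) (q : String × String) =>
      match PySem.List.pyGet? [q.2, q.1] 1 with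
      | none => st
      | some rted =>
        if st.1.contains rted then st
        else
          ((st.1.insert rted ((pvPairs reportList).filterMap ((fun t =>
              match PySem.List.pyGet? t 1, PySem.List.pyGet? t 0 with
              | some u, some a => if u == rted then some a else none
              | _, _ => none) ∘ (fun (q : String × String) => [q.2, q.1])))),
           if k ≤ ((((pvPairs reportList).filterMap ((fun t =>
              match PySem.List.pyGet? t 1, PySem.List.pyGet? t 0 with
              | some u, some a => if u == rted then some a else none
              | _, _ => none) ∘ (fun (q : String × String) => [q.2, q.1]))).length : Int))
           then PySem.Set.add st.2 rted else st.2))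
      = fun st q =>
        if st.1.contains q.1 then st
        else (st.1.insert q.1 (pvG (pvPairs reportList) q.1),
              if k ≤ ((pvG (pvPairs reportList) q.1).length : Int)
              then PySem.Set.add st.2 q.1 else st.2) := by
    funext st q
    show (if st.1.contains q.1 then st
        else (st.1.insert q.1 ((pvPairs reportList).filterMap
                (fun p => if p.1 == q.1 then some p.2 else none)),
              if k ≤ (((pvPairs reportList).filterMap
                (fun p => if p.1 == q.1 then some p.2 else none)).length : Int)
              then PySem.Set.add st.2 q.1 else st.2)) = _
    rw [pv_filterMap_eq]
  rw [hredB]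
  have hB := pv_B_loop (pvPairs reportList) k (pvPairs reportList) [] rfl
  simp only [List.nil_append] at hB
  have hinit : (PySem.Dict.mk ((pvK ([] : List (String × String))).map
        (fun c => (c, pvG (pvPairs reportList) c))),
      (pvK ([] : List (String × String))).filter
        (fun c => decide (k ≤ ((pvG (pvPairs reportList) c).length : Int))))
      = ((PySem.Dict.empty : PySem.Dict String (List String)), ([] : List String)) := rfl
  rw [hinit] at hB
  rw [hB]

-- ===== VERDICT (by name: the statement is the Claim_ definition above) =====
theorem disposeReport_spec : Claim_equal_disposeReport := by
  intro reportList k _ hpre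
  unfold Spec_disposeReport
  rw [pv_A_eval reportList k hpre, pv_B_eval reportList k hpre]
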